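-- pv_equiv track=rewrite | github.com/PSmaruj/akita_semifreddo | optimizations/boundary_suppression/filter_activation_analysis/filter_activation_analysis.py | pad_to_target
-- ===== SOURCE A (Python) =====
-- def pad_to_target(seq: str, target_len: int, bg_seq: str,
--                   bg_offset: int = 0) -> tuple[str, int]:
--     """Centre *seq* and pad symmetrically with background; trim if too long."""
--     if len(seq) >= target_len:
--         excess = len(seq) - target_len
--         s = excess // 2
--         return seq[s:s + target_len], bg_offset
--     pad_total = target_len - len(seq)
--     pad_left  = pad_total // 2
--     pad_right = pad_total - pad_left
--     bg_len = len(bg_seq)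
--     left  = "".join(bg_seq[(bg_offset + i) % bg_len] for i in range(pad_left))
--     bg_offset = (bg_offset + pad_left) % bg_len
--     right = "".join(bg_seq[(bg_offset + i) % bg_len] for i in range(pad_right))
--     bg_offset = (bg_offset + pad_right) % bg_len
--     return left + seq + right, bg_offset
-- ===== SOURCE B (Python) =====
-- def pad_to_target(seq: str, target_len: int, bg_seq: str,
--                   bg_offset: int = 0) -> tuple[str, int]:
--     """Centre *seq* and pad symmetrically with background; trim if too long."""
--     if len(seq) >= target_len:
--         s = (len(seq) - target_len) // 2
--         return seq[s:s + target_len], bg_offset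
--     pad_total = target_len - len(seq)
--     pad_left = pad_total // 2
--     start = bg_offset % len(bg_seq)
--     rot = bg_seq[start:] + bg_seq[:start]
--     padding = (rot * (pad_total // len(bg_seq) + 1))[:pad_total]
--     return padding[:pad_left] + seq + padding[pad_left:], (start + pad_total) % len(bg_seq)
-- ===== Notes on version B (the rewrite author's own statement) =====
-- stated objective: alternative
-- what changed: The padding branch no longer indexes the background per character with a modulo inside a loop: B rotates bg_seq once at the normalized offset, tiles the rotation by string repetition, truncates to pad_total, and splits the result around seq; the new offset is computed directly as (start + pad_total) % len(bg_seq).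
import Mathlib
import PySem

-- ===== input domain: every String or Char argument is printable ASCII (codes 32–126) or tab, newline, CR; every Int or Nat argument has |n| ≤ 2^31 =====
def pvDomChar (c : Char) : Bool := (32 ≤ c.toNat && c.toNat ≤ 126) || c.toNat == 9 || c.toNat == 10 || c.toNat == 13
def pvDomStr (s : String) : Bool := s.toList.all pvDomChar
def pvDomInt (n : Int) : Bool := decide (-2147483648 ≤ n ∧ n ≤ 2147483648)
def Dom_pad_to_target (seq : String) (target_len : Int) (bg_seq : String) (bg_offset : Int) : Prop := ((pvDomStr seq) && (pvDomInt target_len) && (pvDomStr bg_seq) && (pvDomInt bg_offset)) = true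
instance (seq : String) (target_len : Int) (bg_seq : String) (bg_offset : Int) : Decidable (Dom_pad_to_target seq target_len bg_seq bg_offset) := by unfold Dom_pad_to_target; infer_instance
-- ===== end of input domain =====

-- B's padding branch rotates the background once at the normalized offset, tiles the
-- rotation by repetition and truncates, instead of A's per-character modulo indexing
-- loop (objective: alternative).


-- ===== PORT A =====
def pad_to_target (seq : String) (target_len : Int) (bg_seq : String) (bg_offset : Int) : String × Int :=
  let sl := seq.toList
  let n : Int := sl.length
  if n ≥ target_len then
    let excess := n - target_len
    let s := PySem.Int.floordiv excess 2
    (String.ofList (PySem.List.slice sl (some s) (some (s + target_len))), bg_offset)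
  else
    let pad_total := target_len - n
    let pad_left := PySem.Int.floordiv pad_total 2
    let pad_right := pad_total - pad_left
    let bl := bg_seq.toList
    let bg_len : Int := bl.length
    -- bg_seq[(off+i) % bg_len]: the Python index is in range (0 ≤ idx < bg_len) whenever
    -- bg_len ≠ 0 (guaranteed by Pre_), so pyGetD's default is never used
    let left := (PySem.List.pyRange 0 pad_left 1).map
      (fun i => PySem.List.pyGetD bl (PySem.Int.mod (bg_offset + i) bg_len) ' ')
    let off1 := PySem.Int.mod (bg_offset + pad_left) bg_len
    let right := (PySem.List.pyRange 0 pad_right 1).map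
      (fun i => PySem.List.pyGetD bl (PySem.Int.mod (off1 + i) bg_len) ' ')
    let off2 := PySem.Int.mod (off1 + pad_right) bg_len
    (String.ofList (left ++ sl ++ right), off2)

-- ===== PORT B =====
def pad_to_target_alt (seq : String) (target_len : Int) (bg_seq : String) (bg_offset : Int) : String × Int :=
  let sl := seq.toList
  let n : Int := sl.length
  if n ≥ target_len then
    let s := PySem.Int.floordiv (n - target_len) 2
    (String.ofList (PySem.List.slice sl (some s) (some (s + target_len))), bg_offset)
  else
    let pad_total := target_len - n
    let pad_left := PySem.Int.floordiv pad_total 2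
    let bl := bg_seq.toList
    let bg_len : Int := bl.length
    -- start = bg_offset % len(bg_seq): Python raises ZeroDivisionError here when
    -- bg_seq = "" (outside Pre_)
    let start := PySem.Int.mod bg_offset bg_len
    -- rot = bg_seq[start:] + bg_seq[:start]
    let rot := PySem.List.slice bl (some start) none ++ PySem.List.slice bl none (some start)
    -- padding = (rot * (pad_total // len(bg_seq) + 1))[:pad_total]
    let padding := PySem.List.slice
      (PySem.List.pyRepeat rot (PySem.Int.floordiv pad_total bg_len + 1))
      none (some pad_total)
    (String.ofList (PySem.List.slice padding none (some pad_left) ++ sl ++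
                    PySem.List.slice padding (some pad_left) none),
     PySem.Int.mod (start + pad_total) bg_len)

-- ===== PRECONDITION & SPEC =====
-- Pre_ excludes exactly the inputs where A raises ZeroDivisionError: bg_seq empty while
-- padding is needed (len(seq) < target_len); B raises there too.
def Pre_pad_to_target (seq : String) (target_len : Int) (bg_seq : String) (bg_offset : Int) : Prop :=
  bg_seq.toList ≠ [] ∨ (seq.toList.length : Int) ≥ target_len

instance (seq : String) (target_len : Int) (bg_seq : String) (bg_offset : Int) : Decidable (Pre_pad_to_target seq target_len bg_seq bg_offset) := by unfold Pre_pad_to_target; infer_instance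

def pvWitness_pad_to_target : String × Int × String × Int := ("ab", 7, "xyz", 1)

def Spec_pad_to_target (seq : String) (target_len : Int) (bg_seq : String) (bg_offset : Int) (out : String × Int) : Prop := out = pad_to_target_alt seq target_len bg_seq bg_offset
instance (seq : String) (target_len : Int) (bg_seq : String) (bg_offset : Int) (out : String × Int) : Decidable (Spec_pad_to_target seq target_len bg_seq bg_offset out) := by unfold Spec_pad_to_target; infer_instance

-- ===== CLAIM (what is proved, stated in full; the proofs are below) =====
def Claim_equal_pad_to_target : Prop := ∀ (seq : String) (target_len : Int) (bg_seq : String) (bg_offset : Int), Dom_pad_to_target seq target_len bg_seq bg_offset → Pre_pad_to_target seq target_len bg_seq bg_offset → Spec_pad_to_target seq target_len bg_seq bg_offset (pad_to_target seq target_len bg_seq bg_offset)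

-- ===== LEMMAS AND PROOFS =====

-- ((a mod L) + k) mod L = (a + k) mod L for positive L (Python semantics)
theorem pv_mod_add (a k L : Int) (hL : 0 < L) :
    PySem.Int.mod (PySem.Int.mod a L + k) L = PySem.Int.mod (a + k) L := by
  simp only [PySem.Int.mod_eq_emod_of_pos hL]
  rw [Int.add_emod, Int.emod_emod_of_dvd _ dvd_rfl, ← Int.add_emod]

-- element i of the k-fold tiling of rot is rot[i % |rot|]
theorem pv_tile_getElem? {α : Type} (rot : List α) (k i : Nat)
    (hi : i < k * rot.length) :
    ((List.replicate k rot).flatten)[i]? = rot[i % rot.length]? := by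
  induction k generalizing i with
  | zero => omega
  | succ k ih =>
    have hm : 0 < rot.length := by by_contra hc; simp at hc; simp [hc] at hi
    rw [List.replicate_succ, List.flatten_cons, List.getElem?_append]
    by_cases hlt : i < rot.length
    · simp [hlt, Nat.mod_eq_of_lt hlt]
    · push_neg at hlt
      rw [if_neg (by omega), ih (i - rot.length) (by rw [Nat.succ_mul] at hi; omega)]
      congr 1
      exact (Nat.mod_eq_sub_mod hlt).symm

-- element j of the rotation of bl at s (s < |bl|) is bl[(s + j) % |bl|]
theorem pv_rot_getElem? {α : Type} (bl : List α) (s j : Nat)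
    (hs : s < bl.length) (hj : j < bl.length) :
    (bl.drop s ++ bl.take s)[j]? = bl[(s + j) % bl.length]? := by
  rw [List.getElem?_append]
  by_cases hlt : j < bl.length - s
  · rw [if_pos (by simp; omega), List.getElem?_drop]
    congr 1
    exact (Nat.mod_eq_of_lt (by omega)).symm
  · push_neg at hlt
    rw [if_neg (by simp; omega), List.length_drop,
        List.getElem?_take_of_lt (by omega)]
    congr 1
    rw [Nat.mod_eq_sub_mod (by omega), Nat.mod_eq_of_lt (by omega)]
    omega

-- ===== VERDICT (by name: the statement is the Claim_ definition above) =====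
theorem pad_to_target_spec : Claim_equal_pad_to_target := by
  intro seq target_len bg_seq bg_offset _ hpre
  unfold Spec_pad_to_target pad_to_target pad_to_target_alt
  dsimp only
  split_ifs with h
  · rfl
  · rcases hpre with hbg | hbg
    · have hL : 0 < (bg_seq.toList.length : Int) := by
        have := List.length_pos_iff.mpr hbg; exact_mod_cast this
      set o := bg_offset
      set bl := bg_seq.toList with hbldef
      set m : Nat := bl.length with hmdef
      set L : Int := (bl.length : Int) with hLdef
      have hm0 : 0 < m := by omega
      set pt : Int := target_len - (seq.toList.length : Int) with hpt
      have hpt0 : 0 < pt := by omega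
      set pl : Int := PySem.Int.floordiv pt 2 with hpl
      have hple : pl = pt / 2 := PySem.Int.floordiv_eq_ediv_of_pos (by omega)
      have hpl0 : 0 ≤ pl := by rw [hple]; exact Int.ediv_nonneg (by omega) (by omega)
      have hplpt : pl ≤ pt := by rw [hple]; exact Int.ediv_le_self _ (by omega)
      set f : Int → Char := fun i => PySem.List.pyGetD bl (PySem.Int.mod (o + i) L) ' ' with hf
      -- A's two pieces are the split of one comprehension over range(pt)
      have hsplit : PySem.List.pyRange 0 pt 1 = PySem.List.pyRange 0 pl 1 ++ PySem.List.pyRange pl pt 1 :=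
        PySem.List.pyRange_one_append 0 pl pt hpl0 hplpt
      have hlen : ((PySem.List.pyRange 0 pl 1).map f).length = pl.toNat := by
        simp [PySem.List.length_pyRange_one]
      have htail : (PySem.List.pyRange pl pt 1).map f
          = (PySem.List.pyRange 0 (pt - pl) 1).map
              (fun i => PySem.List.pyGetD bl
                (PySem.Int.mod (PySem.Int.mod (o + pl) L + i) L) ' ') := by
        rw [PySem.List.pyRange_one, PySem.List.pyRange_one, List.map_map, List.map_map]
        have : (pt - pl).toNat = (pt - pl - 0).toNat := by omega
        rw [← this]
        refine List.map_congr_left ?_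
        intro k _
        simp only [Function.comp, hf]
        rw [pv_mod_add _ _ _ hL]
        congr 2
        omega
      -- B's truncated tiling IS that comprehension
      set s : Int := PySem.Int.mod o L with hs
      have hs0 : 0 ≤ s := PySem.Int.mod_nonneg o hL
      have hsL : s < L := PySem.Int.mod_lt o hL
      set rot : List Char := PySem.List.slice bl (some s) none ++ PySem.List.slice bl none (some s) with hrot
      have hrot' : rot = bl.drop s.toNat ++ bl.take s.toNat := by
        rw [hrot, PySem.List.slice_from _ hs0, PySem.List.slice_to _ hs0]
      have hrotlen : rot.length = m := by
        rw [hrot']; simp; omega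
      set reps : Int := PySem.Int.floordiv pt L + 1 with hreps
      have hrepse : reps = pt / L + 1 := by
        rw [hreps, PySem.Int.floordiv_eq_ediv_of_pos hL]
      have hbig : pt.toNat ≤ reps.toNat * m := by
        have h1 : pt < reps * L := by
          rw [hrepse]
          have h2 := Int.ediv_add_emod pt L
          have h3 := Int.emod_lt_of_pos pt hL
          nlinarith
        have h2 : (0:Int) ≤ reps := by
          rw [hrepse]
          have := Int.ediv_nonneg (le_of_lt hpt0) (le_of_lt hL)
          omega
        have h4 : (pt.toNat : Int) ≤ (reps.toNat : Int) * (m : Int) := by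
          rw [Int.toNat_of_nonneg (by omega), Int.toNat_of_nonneg h2]
          have hLm : ((m : Nat) : Int) = L := by rw [hLdef, hmdef]
          rw [hLm]
          linarith
        exact_mod_cast h4
      have hpadding : PySem.List.slice (PySem.List.pyRepeat rot reps) none (some pt)
          = (PySem.List.pyRange 0 pt 1).map f := by
        rw [PySem.List.slice_to _ (by omega), PySem.List.pyRepeat, PySem.List.pyRange_one]
        refine List.ext_getElem? ?_
        intro i
        by_cases hi : i < pt.toNat
        · rw [List.getElem?_take_of_lt hi,
              pv_tile_getElem? rot reps.toNat i (by rw [hrotlen]; omega)]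
          have him : i % rot.length = i % m := by rw [hrotlen]
          rw [him, hrot',
              pv_rot_getElem? bl s.toNat (i % m) (by omega) (Nat.mod_lt i hm0)]
          rw [List.getElem?_map, List.getElem?_map,
              List.getElem?_range (by omega)]
          have hidx : PySem.Int.mod (o + ((0:Int) + (i:Nat))) L
              = (((s.toNat + i % m) % m : Nat) : Int) := by
            have e1 : o + ((0:Int) + (i:Nat)) = o + (i:Nat) := by ring
            rw [e1, ← pv_mod_add o (i:Nat) L hL, ← hs, PySem.Int.mod_eq_emod_of_pos hL]
            have e3 : ((s.toNat + i % m) % m : Nat) = ((s.toNat + i) % m : Nat) := by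
              simp [Nat.add_mod]
            have e2 : s = ((s.toNat : Nat) : Int) := by omega
            rw [e3, Int.natCast_mod, Nat.cast_add, ← e2, hLdef, hmdef]
          simp only [Option.map_some, hf, hidx, PySem.List.pyGetD_natCast,
                     List.getD_eq_getElem?_getD]
          rw [List.getElem?_eq_getElem (by exact Nat.mod_lt _ hm0)]
          rfl
        · rw [List.getElem?_eq_none (by simp; omega),
              List.getElem?_eq_none (by simp; omega)]
      have htake : PySem.List.slice ((PySem.List.pyRange 0 pt 1).map f) none (some pl)
          = (PySem.List.pyRange 0 pl 1).map f := by
        rw [PySem.List.slice_to _ hpl0, hsplit, List.map_append, ← hlen, List.take_left]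
      have hdrop : PySem.List.slice ((PySem.List.pyRange 0 pt 1).map f) (some pl) none
          = (PySem.List.pyRange pl pt 1).map f := by
        rw [PySem.List.slice_from _ hpl0, hsplit, List.map_append, ← hlen, List.drop_left]
      refine Prod.ext ?_ ?_
      · show String.ofList _ = String.ofList _
        rw [hpadding, htake, hdrop, htail]
      · show PySem.Int.mod (PySem.Int.mod (o + pl) L + (pt - pl)) L
            = PySem.Int.mod (s + pt) L
        rw [hs, pv_mod_add _ _ _ hL, pv_mod_add _ _ _ hL]
        congr 1
        omega
    · exact absurd hbg (by omega)
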